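-- pv_equiv track=rewrite | github.com/keepggoing/algorithm | 인구이동.py | check
-- ===== SOURCE A (Python) =====
-- def check(v):
--     temp=[]
--     for row in v:
--         for num in row:
--             temp.append(num)
--     # 같은게 없다 -> 더 해야한다
--     if len(temp) != len(set(temp)):
--         return 1
--     else:
--         return 0
-- ===== SOURCE B (Python) =====
-- def check(v):
--     seen = set()
--     for row in v:
--         for num in row:
--             if num in seen:
--                 return 1
--             seen.add(num)
--     return 0
-- ===== Notes on version B (the rewrite author's own statement) =====
-- stated objective: simpler
-- what changed: B replaces A's flatten-everything-then-compare len(list) vs len(set) with a single pass that maintains a seen-set and returns 1 immediately on the first repeated value.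
import Mathlib
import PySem

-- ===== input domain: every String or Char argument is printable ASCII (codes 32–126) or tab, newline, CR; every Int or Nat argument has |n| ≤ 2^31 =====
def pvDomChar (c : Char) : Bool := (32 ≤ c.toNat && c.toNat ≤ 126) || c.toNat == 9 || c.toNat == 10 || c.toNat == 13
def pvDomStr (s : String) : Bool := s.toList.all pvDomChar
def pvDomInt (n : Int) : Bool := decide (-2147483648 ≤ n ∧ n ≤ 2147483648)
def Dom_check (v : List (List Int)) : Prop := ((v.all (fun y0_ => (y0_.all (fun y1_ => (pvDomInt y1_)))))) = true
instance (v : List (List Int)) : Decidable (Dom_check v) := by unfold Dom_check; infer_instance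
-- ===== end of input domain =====

-- B replaces A's flatten-then-compare-len(list)-vs-len(set) with a single pass over
-- the grid that maintains a seen-set and returns 1 at the first repeated value (simpler, early exit).

-- ===== PORT A =====
def check (v : List (List Int)) : Int :=
  let temp := v.foldl (fun t row => row.foldl (fun t n => t ++ [n]) t) []
  if temp.length ≠ (PySem.Set.ofList temp).length then 1 else 0

-- ===== PORT B =====
-- inner 'for num in row' loop: none signals the early 'return 1'
def scanRow (seen : PySem.Set Int) : List Int → Option (PySem.Set Int)
  | [] => some seen
  | n :: ns => if PySem.Set.contains seen n then none else scanRow (PySem.Set.add seen n) ns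

-- outer 'for row in v' loop
def scanGrid (seen : PySem.Set Int) : List (List Int) → Int
  | [] => 0
  | r :: rs =>
    match scanRow seen r with
    | none => 1
    | some s => scanGrid s rs

def check_alt (v : List (List Int)) : Int := scanGrid PySem.Set.empty v

-- ===== PRECONDITION & SPEC =====
def Spec_check (v : List (List Int)) (out : Int) : Prop := out = check_alt v
instance (v : List (List Int)) (out : Int) : Decidable (Spec_check v out) := by unfold Spec_check; infer_instance

-- ===== CLAIM (what is proved, stated in full; the proofs are below) =====
def Claim_equal_check : Prop := ∀ (v : List (List Int)), Dom_check v → Spec_check v (check v)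

-- ===== LEMMAS AND PROOFS =====

theorem set_contains_false (seen : List Int) (n : Int) (hn : n ∉ seen) :
    PySem.Set.contains seen n = false := by
  simp only [PySem.Set.contains, List.contains_eq_mem, decide_eq_false_iff_not]
  exact hn

theorem set_contains_true (seen : List Int) (n : Int) (hn : n ∈ seen) :
    PySem.Set.contains seen n = true := by
  simp only [PySem.Set.contains, List.contains_eq_mem, decide_eq_true_eq]
  exact hn

theorem set_add_not_mem (seen : List Int) (n : Int) (hn : n ∉ seen) :
    PySem.Set.add seen n = seen ++ [n] := by
  simp only [PySem.Set.add, PySem.Set.contains, List.contains_eq_mem, decide_eq_true_eq]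
  rw [if_neg hn]

theorem set_add_mem (seen : List Int) (n : Int) (hn : n ∈ seen) :
    PySem.Set.add seen n = seen := by
  simp only [PySem.Set.add, PySem.Set.contains, List.contains_eq_mem, decide_eq_true_eq]
  rw [if_pos hn]

theorem nodup_snoc (seen : List Int) (n : Int) (hs : seen.Nodup) (hn : n ∉ seen) :
    (seen ++ [n]).Nodup := by
  simp only [List.nodup_append, List.nodup_singleton]
  refine ⟨hs, trivial, ?_⟩
  intro a ha b hb
  simp only [List.mem_singleton] at hb
  subst hb
  exact fun he => hn (he ▸ ha)

theorem foldl_add_le (l seen : List Int) :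
    (l.foldl PySem.Set.add seen).length ≤ seen.length + l.length := by
  induction l generalizing seen with
  | nil => simp
  | cons n ns ih =>
    simp only [List.foldl_cons]
    have h1 : (PySem.Set.add seen n).length ≤ seen.length + 1 := by
      simp only [PySem.Set.add]
      split
      · omega
      · simp
    have h2 := ih (PySem.Set.add seen n)
    simp only [List.length_cons]
    omega

theorem foldl_add_of_nodup (l seen : List Int) (h : (seen ++ l).Nodup) :
    l.foldl PySem.Set.add seen = seen ++ l := by
  induction l generalizing seen with
  | nil => simp
  | cons n ns ih =>
    have hn : n ∉ seen := by
      intro hmem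
      have := List.disjoint_of_nodup_append h hmem
      simp at this
    simp only [List.foldl_cons, set_add_not_mem seen n hn]
    rw [ih (seen ++ [n]) (by simpa using h), List.append_assoc]
    rfl

theorem foldl_add_of_dup (l seen : List Int) (hs : seen.Nodup) (h : ¬ (seen ++ l).Nodup) :
    (l.foldl PySem.Set.add seen).length < seen.length + l.length := by
  induction l generalizing seen with
  | nil => simp at h; exact absurd hs h
  | cons n ns ih =>
    by_cases hn : n ∈ seen
    · simp only [List.foldl_cons, set_add_mem seen n hn, List.length_cons]
      have := foldl_add_le ns seen
      omega
    · simp only [List.foldl_cons, set_add_not_mem seen n hn]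
      have hlt := ih (seen ++ [n]) (nodup_snoc seen n hs hn) (by simpa using h)
      simp only [List.length_append, List.length_cons, List.length_nil] at hlt ⊢
      omega

theorem length_ofList_eq_iff (l : List Int) :
    ((PySem.Set.ofList l).length = l.length) ↔ l.Nodup := by
  constructor
  · intro heq
    by_contra hnd
    have := foldl_add_of_dup l [] List.nodup_nil (by simpa using hnd)
    rw [show l.foldl PySem.Set.add [] = PySem.Set.ofList l from rfl] at this
    simp at this; omega
  · intro hnd
    have := foldl_add_of_nodup l [] (by simpa using hnd)
    rw [show l.foldl PySem.Set.add [] = PySem.Set.ofList l from rfl] at this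
    simp [this]

theorem check_closed (v : List (List Int)) :
    check v = if v.flatten.Nodup then 0 else 1 := by
  have hinner : (fun (t : List Int) (row : List Int) => row.foldl (fun t n => t ++ [n]) t)
      = (fun t row => t ++ row) := by
    funext t row
    exact PySem.List.foldl_append_singleton row t
  have hflat : ∀ (w : List (List Int)) (acc : List Int),
      w.foldl (fun t row => t ++ row) acc = acc ++ w.flatten := by
    intro w
    induction w with
    | nil => simp
    | cons r rs ih => intro acc; simp [ih, List.append_assoc]
  simp only [check, hinner, hflat v [], List.nil_append]
  by_cases hn : v.flatten.Nodup
  · rw [if_neg (by simp [(length_ofList_eq_iff v.flatten).2 hn]), if_pos hn]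
  · rw [if_pos (by intro he; exact hn ((length_ofList_eq_iff v.flatten).1 he.symm)), if_neg hn]

theorem scanRow_of_nodup (r seen : List Int) (h : (seen ++ r).Nodup) :
    scanRow seen r = some (seen ++ r) := by
  induction r generalizing seen with
  | nil => simp [scanRow]
  | cons n ns ih =>
    have hn : n ∉ seen := by
      intro hmem
      have := List.disjoint_of_nodup_append h hmem
      simp at this
    simp only [scanRow, set_contains_false seen n hn, Bool.false_eq_true, if_false,
      set_add_not_mem seen n hn]
    rw [ih (seen ++ [n]) (by simpa using h), List.append_assoc]
    rfl

theorem scanRow_of_dup (r seen : List Int) (hs : seen.Nodup) (h : ¬ (seen ++ r).Nodup) :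
    scanRow seen r = none := by
  induction r generalizing seen with
  | nil => simp at h; exact absurd hs h
  | cons n ns ih =>
    by_cases hn : n ∈ seen
    · simp only [scanRow, set_contains_true seen n hn]
      rfl
    · simp only [scanRow, set_contains_false seen n hn, Bool.false_eq_true, if_false,
        set_add_not_mem seen n hn]
      exact ih (seen ++ [n]) (nodup_snoc seen n hs hn) (by simpa using h)

theorem scanGrid_closed (rs : List (List Int)) (seen : List Int) (hs : seen.Nodup) :
    scanGrid seen rs = if (seen ++ rs.flatten).Nodup then 0 else 1 := by
  induction rs generalizing seen with
  | nil => simp [scanGrid, hs]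
  | cons r rest ih =>
    by_cases h1 : (seen ++ r).Nodup
    · simp only [scanGrid, scanRow_of_nodup r seen h1]
      rw [ih (seen ++ r) h1]
      simp [List.append_assoc]
    · simp only [scanGrid, scanRow_of_dup r seen hs h1]
      rw [if_neg]
      intro hnd
      exact h1 (hnd.sublist (by
        have := List.sublist_append_left (seen ++ r) rest.flatten
        rwa [List.append_assoc] at this))

-- ===== VERDICT (by name: the statement is the Claim_ definition above) =====
theorem check_spec : Claim_equal_check := by
  intro v _
  unfold Spec_check check_alt
  rw [check_closed v, scanGrid_closed v PySem.Set.empty List.nodup_nil]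
  simp [PySem.Set.empty]
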